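-- pv_equiv track=rewrite | github.com/raeez/chiral-bar-cobar | compute/lib/genus5_amplitude_engine.py | _enumerate_edges_with_pruning
-- ===== SOURCE A (Python) =====
-- from typing import Any, Dict, List, Tuple
--
-- def _min_valence(g: int) -> int:
--     """Minimum valence for a stable vertex of genus g with no legs."""
--     if g == 0:
--         return 3
--     elif g == 1:
--         return 1
--     else:
--         return 0
--
-- def _enumerate_edges_with_pruning(
--     genera: Tuple[int, ...],
--     num_edges: int,
-- ) -> List[Tuple[Tuple[int, int], ...]]:
--     """Enumerate edge multisets with stability-aware pruning."""
--     num_v = len(genera)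
--     min_vals = [_min_valence(g) for g in genera]
--
--     edge_types = []
--     for i in range(num_v):
--         for j in range(i, num_v):
--             edge_types.append((i, j))
--
--     results = []
--
--     def _search(depth, start_idx, current_val, edges_so_far):
--         if depth == num_edges:
--             for v in range(num_v):
--                 if current_val[v] < min_vals[v]:
--                     return
--             results.append(tuple(edges_so_far))
--             return
--
--         remaining = num_edges - depth
--         total_deficit = 0
--         for v in range(num_v):
--             deficit = min_vals[v] - current_val[v]
--             if deficit > 0:
--                 total_deficit += deficit
--                 if deficit > 2 * remaining:
--                     return
--         if total_deficit > 2 * remaining: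
--             return
--
--         for idx in range(start_idx, len(edge_types)):
--             v1, v2 = edge_types[idx]
--             if v1 == v2:
--                 current_val[v1] += 2
--             else:
--                 current_val[v1] += 1
--                 current_val[v2] += 1
--             edges_so_far.append(edge_types[idx])
--             _search(depth + 1, idx, current_val, edges_so_far)
--             edges_so_far.pop()
--             if v1 == v2:
--                 current_val[v1] -= 2
--             else:
--                 current_val[v1] -= 1
--                 current_val[v2] -= 1
--
--     _search(0, 0, [0] * num_v, [])
--     return results
-- ===== SOURCE B (Python) =====
-- from itertools import combinations_with_replacement
-- from typing import List, Tuple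
--
-- def _min_valence(g: int) -> int:
--     if g == 0:
--         return 3
--     elif g == 1:
--         return 1
--     else:
--         return 0
--
-- def _enumerate_edges_with_pruning(
--     genera: Tuple[int, ...],
--     num_edges: int,
-- ) -> List[Tuple[Tuple[int, int], ...]]:
--     """Flat enumeration: every nondecreasing edge multiset, kept iff stable."""
--     num_v = len(genera)
--     min_vals = [_min_valence(g) for g in genera]
--     edge_types = [(i, j) for i in range(num_v) for j in range(i, num_v)]
--     if num_edges < 0:
--         return []
--     results = []
--     for combo in combinations_with_replacement(edge_types, num_edges):
--         val = [0] * num_v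
--         for v1, v2 in combo:
--             if v1 == v2:
--                 val[v1] += 2
--             else:
--                 val[v1] += 1
--                 val[v2] += 1
--         if all(val[v] >= min_vals[v] for v in range(num_v)):
--             results.append(combo)
--     return results
-- ===== Notes on version B (the rewrite author's own statement) =====
-- stated objective: simpler
-- what changed: Replaces the recursive backtracking search with deficit-based pruning by a flat scan over combinations_with_replacement of edge types, keeping each multiset iff its valence vector meets the stability minima; Pre_ excludes nonempty genera with num_edges > 9000, where A's recursion depth (= num_edges) overruns the interpreter's recursion limit and A raises RecursionError.
import Mathlib
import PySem

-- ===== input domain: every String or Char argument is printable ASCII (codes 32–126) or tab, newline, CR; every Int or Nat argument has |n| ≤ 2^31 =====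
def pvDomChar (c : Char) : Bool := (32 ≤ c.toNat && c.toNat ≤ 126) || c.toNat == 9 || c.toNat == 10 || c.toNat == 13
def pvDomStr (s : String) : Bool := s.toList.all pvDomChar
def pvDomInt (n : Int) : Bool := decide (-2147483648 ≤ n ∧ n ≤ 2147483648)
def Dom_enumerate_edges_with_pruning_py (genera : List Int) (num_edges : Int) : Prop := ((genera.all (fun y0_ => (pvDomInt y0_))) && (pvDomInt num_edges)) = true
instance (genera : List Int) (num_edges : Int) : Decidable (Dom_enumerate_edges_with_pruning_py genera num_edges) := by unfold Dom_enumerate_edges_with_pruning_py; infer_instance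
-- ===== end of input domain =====

-- B replaces A's recursive backtracking search (with deficit pruning) by a flat scan over all
-- combinations-with-replacement of edge types filtered by the final stability check: simpler, same results.

-- ===== PORT A =====
-- _min_valence (shared helper of both Pythons)
def pvMinValence (g : Int) : Int := if g == 0 then 3 else if g == 1 then 1 else 0

-- edge_types: both Pythons build the list [(i, j) for i in range(num_v) for j in range(i, num_v)]
def pvEdgeTypes (num_v : Int) : List (Int × Int) :=
  (PySem.List.pyRange 0 num_v).flatMap (fun i => (PySem.List.pyRange i num_v).map (fun j => (i, j)))

-- current_val[v] += a; v is a nonnegative in-range index by construction, so .toNat is exact here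
def pvAddAt (val : List Int) (v : Int) (a : Int) : List Int := val.modify v.toNat (· + a)

-- the identical 4-line valence update both Pythons perform for an edge (v1, v2)
def pvBump (val : List Int) (v1 v2 : Int) : List Int :=
  if v1 == v2 then pvAddAt val v1 2 else pvAddAt (pvAddAt val v1 1) v2 1

-- the depth == num_edges stability check of _search ('for v in range(num_v): if current_val[v] < min_vals[v]: return')
def pvStableCheckA (num_v : Int) (min_vals val : List Int) : Bool :=
  (PySem.List.pyRange 0 num_v).all
    (fun v => !(decide (PySem.List.pyGetD val v 0 < PySem.List.pyGetD min_vals v 0)))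

-- the early-return test of the deficit loop: some positive deficit exceeds 2*remaining
def pvAnyBigDeficit (num_v : Int) (min_vals val : List Int) (remaining : Int) : Bool :=
  (PySem.List.pyRange 0 num_v).any (fun v =>
    let d := PySem.List.pyGetD min_vals v 0 - PySem.List.pyGetD val v 0
    decide (d > 0) && decide (d > 2 * remaining))

-- total_deficit as accumulated by the same loop
def pvTotalDeficit (num_v : Int) (min_vals val : List Int) : Int :=
  (PySem.List.pyRange 0 num_v).foldl (fun t v =>
    let d := PySem.List.pyGetD min_vals v 0 - PySem.List.pyGetD val v 0
    if d > 0 then t + d else t) 0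

lemma pvTotalDeficit_aux (l : List Int) (f : Int → Int) :
    ∀ t : Int, l.foldl (fun t v => if f v > 0 then t + f v else t) t = t + (l.map (fun v => max (f v) 0)).sum := by
  induction l with
  | nil => intro t; simp
  | cons x xs ih =>
    intro t
    simp only [List.foldl_cons, List.map_cons, List.sum_cons, ih]
    split <;> omega

lemma pvTotalDeficit_nonneg (num_v : Int) (min_vals val : List Int) :
    0 ≤ pvTotalDeficit num_v min_vals val := by
  unfold pvTotalDeficit
  rw [pvTotalDeficit_aux (f := fun v => PySem.List.pyGetD min_vals v 0 - PySem.List.pyGetD val v 0)]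
  have h : 0 ≤ ((PySem.List.pyRange 0 num_v).map (fun v => max (PySem.List.pyGetD min_vals v 0 - PySem.List.pyGetD val v 0) 0)).sum := by
    apply List.sum_nonneg
    intro x hx
    simp only [List.mem_map] at hx
    obtain ⟨v, -, rfl⟩ := hx
    exact le_max_right _ _
  omega

-- _search, transliterated: the two early returns of the deficit loop are output-equivalent to
-- checking the per-vertex condition first and the accumulated total second (both return []).
def pvSearch (num_edges num_v : Int) (min_vals : List Int) (edge_types : List (Int × Int))
    (depth start_idx : Int) (val : List Int) (edges : List (Int × Int)) : List (List (Int × Int)) :=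
  if depth == num_edges then
    (if pvStableCheckA num_v min_vals val then [edges] else [])
  else
    let remaining := num_edges - depth
    if pvAnyBigDeficit num_v min_vals val remaining then []
    else if h2 : pvTotalDeficit num_v min_vals val > 2 * remaining then []
    else
      (PySem.List.pyRange start_idx (edge_types.length : Int)).foldl
        (fun acc idx =>
          let e := PySem.List.pyGetD edge_types idx (0, 0)
          acc ++ pvSearch num_edges num_v min_vals edge_types (depth + 1) idx
                   (pvBump val e.1 e.2) (edges ++ [e]))
        []
termination_by (num_edges - depth).toNat
decreasing_by
  have h0 : 0 ≤ pvTotalDeficit num_v min_vals val := pvTotalDeficit_nonneg _ _ _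
  simp_all
  omega

def enumerate_edges_with_pruning_py (genera : List Int) (num_edges : Int) : List (List (Int × Int)) :=
  let num_v : Int := (genera.length : Int)
  let min_vals := genera.map pvMinValence
  let edge_types := pvEdgeTypes num_v
  pvSearch num_edges num_v min_vals edge_types 0 0 (List.replicate genera.length 0) []

-- ===== PORT B =====
-- itertools.combinations_with_replacement(xs, r), in its emission order (hand port; exact)
def pvCWR : List (Int × Int) → Nat → List (List (Int × Int))
  | _, 0 => [[]]
  | [], _ + 1 => []
  | x :: rest, n + 1 => ((pvCWR (x :: rest) n).map (x :: ·)) ++ pvCWR rest (n + 1)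
termination_by xs n => (n, xs.length)

-- the valence-accumulation loop of B ('for v1, v2 in combo: …')
def pvAcc (val : List Int) (combo : List (Int × Int)) : List Int :=
  combo.foldl (fun w e => pvBump w e.1 e.2) val

-- 'all(val[v] >= min_vals[v] for v in range(num_v))'
def pvStableB (min_vals val : List Int) : Bool :=
  (List.range min_vals.length).all (fun v => decide (min_vals.getD v 0 ≤ val.getD v 0))

def enumerate_edges_with_pruning_py_alt (genera : List Int) (num_edges : Int) : List (List (Int × Int)) :=
  let num_v := genera.length
  let min_vals := genera.map pvMinValence
  let edge_types := pvEdgeTypes (num_v : Int)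
  if num_edges < 0 then []
  else (pvCWR edge_types num_edges.toNat).filter
         (fun c => pvStableB min_vals (pvAcc (List.replicate num_v 0) c))

-- ===== PRECONDITION & SPEC =====
-- Pre_ excludes nonempty genera with num_edges > 9000: A's _search recurses to depth num_edges there,
-- so past the interpreter's recursion limit A raises RecursionError (A returns [] instantly when
-- genera is empty, for any num_edges); the margin keeps every depth that returns under that limit inside.
def Pre_enumerate_edges_with_pruning_py (genera : List Int) (num_edges : Int) : Prop :=
  genera = [] ∨ num_edges ≤ 9000
instance (genera : List Int) (num_edges : Int) : Decidable (Pre_enumerate_edges_with_pruning_py genera num_edges) := by unfold Pre_enumerate_edges_with_pruning_py; infer_instance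

def pvWitness_enumerate_edges_with_pruning_py : List Int × Int := ([0, 2], 2)

def Spec_enumerate_edges_with_pruning_py (genera : List Int) (num_edges : Int) (out : List (List (Int × Int))) : Prop := out = enumerate_edges_with_pruning_py_alt genera num_edges
instance (genera : List Int) (num_edges : Int) (out : List (List (Int × Int))) : Decidable (Spec_enumerate_edges_with_pruning_py genera num_edges out) := by unfold Spec_enumerate_edges_with_pruning_py; infer_instance

-- ===== CLAIM (what is proved, stated in full; the proofs are below) =====
def Claim_equal_enumerate_edges_with_pruning_py : Prop := ∀ (genera : List Int) (num_edges : Int), Dom_enumerate_edges_with_pruning_py genera num_edges → Pre_enumerate_edges_with_pruning_py genera num_edges → Spec_enumerate_edges_with_pruning_py genera num_edges (enumerate_edges_with_pruning_py genera num_edges)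

-- ===== LEMMAS AND PROOFS =====

-- contribution of one edge to the valence of vertex v
def pvContrib (e : Int × Int) (v : Nat) : Int :=
  if e.1 = e.2 then (if e.1 = (v : Int) then 2 else 0)
  else (if e.1 = (v : Int) then 1 else 0) + (if e.2 = (v : Int) then 1 else 0)

-- total contribution of an edge list to vertex v
def pvW (c : List (Int × Int)) (v : Nat) : Int := (c.map (fun e => pvContrib e v)).sum

-- an edge with both endpoints in range
def pvValidE (n : Nat) (e : Int × Int) : Prop :=
  0 ≤ e.1 ∧ e.1 < (n : Int) ∧ 0 ≤ e.2 ∧ e.2 < (n : Int)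

-- the stability predicate as a Prop
def pvOK (mv val : List Int) : Prop := ∀ v : Nat, v < mv.length → mv.getD v 0 ≤ val.getD v 0

lemma pvBump_length (val : List Int) (v1 v2 : Int) : (pvBump val v1 v2).length = val.length := by
  unfold pvBump pvAddAt; split <;> simp

lemma pvAddAt_getD (val : List Int) (i a : Int) (hi0 : 0 ≤ i) (hilt : i < (val.length : Int)) (v : Nat) :
    (pvAddAt val i a).getD v 0 = val.getD v 0 + (if i = (v : Int) then a else 0) := by
  unfold pvAddAt
  rw [List.getD_eq_getElem?_getD, List.getD_eq_getElem?_getD, List.getElem?_modify]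
  by_cases hv : v < val.length
  · rw [List.getElem?_eq_getElem hv]
    by_cases hiv : i = (v : Int)
    · have ht : i.toNat = v := by omega
      simp [hiv]
    · have ht : i.toNat ≠ v := by omega
      simp [ht, hiv]
  · have h1 : val[v]? = none := by rw [List.getElem?_eq_none_iff]; omega
    have h2 : ¬ (i = (v : Int)) := by omega
    simp [h1, h2]

lemma pvBump_getD (n : Nat) (val : List Int) (e : Int × Int) (hv : val.length = n)
    (he : pvValidE n e) (v : Nat) :
    (pvBump val e.1 e.2).getD v 0 = val.getD v 0 + pvContrib e v := by
  obtain ⟨h1, h2, h3, h4⟩ := he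
  unfold pvBump pvContrib
  by_cases hee : e.1 = e.2
  · rw [if_pos (by exact beq_iff_eq.mpr hee), if_pos hee]
    rw [pvAddAt_getD val e.1 2 h1 (by omega) v]
  · rw [if_neg (by simp [hee]), if_neg hee]
    have hlen : (pvAddAt val e.1 1).length = val.length := by simp [pvAddAt]
    rw [pvAddAt_getD _ e.2 1 h3 (by rw [hlen]; omega) v,
        pvAddAt_getD val e.1 1 h1 (by omega) v]
    ring

lemma pvAcc_getD (n : Nat) (c : List (Int × Int)) :
    ∀ val : List Int, val.length = n → (∀ e ∈ c, pvValidE n e) → ∀ v : Nat,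
    (pvAcc val c).getD v 0 = val.getD v 0 + pvW c v := by
  induction c with
  | nil => intro val _ _ v; simp [pvAcc, pvW]
  | cons e c ih =>
    intro val hval hc v
    have he : pvValidE n e := hc e (List.mem_cons_self ..)
    have h1 : (pvBump val e.1 e.2).length = n := by rw [pvBump_length]; exact hval
    simp only [pvAcc, List.foldl_cons]
    rw [show (List.foldl (fun w e => pvBump w e.1 e.2) (pvBump val e.1 e.2) c) = pvAcc (pvBump val e.1 e.2) c from rfl]
    rw [ih _ h1 (fun e' he' => hc e' (List.mem_cons_of_mem _ he')) v]
    rw [pvBump_getD n val e hval he v]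
    simp only [pvW, List.map_cons, List.sum_cons]
    ring

lemma pvContrib_nonneg (e : Int × Int) (v : Nat) : 0 ≤ pvContrib e v := by
  unfold pvContrib; split_ifs <;> omega

lemma pvIndicator_sum (a : Int) : ∀ (n : Nat) (x : Int),
    ((List.range n).map (fun (v : Nat) => if x = (v : Int) then a else 0)).sum
      = if 0 ≤ x ∧ x < (n : Int) then a else 0 := by
  intro n
  induction n with
  | zero => intro x; simp
  | succ m ih =>
    intro x
    rw [List.range_succ]
    simp only [List.map_append, List.sum_append, List.map_cons, List.map_nil, List.sum_cons,
      List.sum_nil, ih]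
    have hc : ((m : Int)) = (m : Int) := rfl
    by_cases hx : x = (m : Int)
    · subst hx
      rw [if_neg (by push_cast; omega), if_pos rfl, if_pos (by push_cast; omega)]
      omega
    · rw [if_neg hx]
      by_cases h2 : 0 ≤ x ∧ x < (m : Int)
      · rw [if_pos h2, if_pos (by push_cast at h2 ⊢; omega)]; omega
      · rw [if_neg h2, if_neg (by push_cast at h2 ⊢; omega)]; omega

lemma pvContrib_sum (n : Nat) (e : Int × Int) (he : pvValidE n e) :
    ((List.range n).map (fun v => pvContrib e v)).sum = 2 := by
  obtain ⟨h1, h2, h3, h4⟩ := he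
  unfold pvContrib
  by_cases hee : e.1 = e.2
  · simp only [if_pos hee]
    rw [pvIndicator_sum 2 n e.1, if_pos ⟨h1, h2⟩]
  · simp only [if_neg hee]
    rw [PySem.List.sum_map_add_int, pvIndicator_sum 1 n e.1, pvIndicator_sum 1 n e.2,
      if_pos ⟨h1, h2⟩, if_pos ⟨h3, h4⟩]
    norm_num

lemma pvW_sum (n : Nat) (c : List (Int × Int)) (hc : ∀ e ∈ c, pvValidE n e) :
    ((List.range n).map (fun v => pvW c v)).sum = 2 * (c.length : Int) := by
  induction c with
  | nil => simp [pvW]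
  | cons e c ih =>
    have : ((List.range n).map (fun v => pvW (e :: c) v))
        = (List.range n).map (fun v => pvContrib e v + pvW c v) := by
      simp [pvW]
    rw [this, PySem.List.sum_map_add_int,
      pvContrib_sum n e (hc e (List.mem_cons_self ..)),
      ih (fun e' he' => hc e' (List.mem_cons_of_mem _ he'))]
    simp [List.length_cons]
    push_cast
    ring

lemma pvW_nonneg (c : List (Int × Int)) (v : Nat) : 0 ≤ pvW c v := by
  apply List.sum_nonneg
  intro x hx
  simp only [List.mem_map] at hx
  obtain ⟨e, -, rfl⟩ := hx
  exact pvContrib_nonneg e v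

lemma pvStableB_iff (mv val : List Int) : pvStableB mv val = true ↔ pvOK mv val := by
  simp [pvStableB, pvOK, List.all_eq_true]

lemma pvStableCheckA_eq (n : Nat) (mv val : List Int) (hmv : mv.length = n) :
    pvStableCheckA (n : Int) mv val = pvStableB mv val := by
  unfold pvStableCheckA pvStableB
  rw [PySem.List.pyRange_zero_nat, List.all_map, hmv]
  have hfun : ((fun v => !decide (PySem.List.pyGetD val v 0 < PySem.List.pyGetD mv v 0)) ∘ (fun (k : Nat) => (k : Int)))
      = (fun (v : Nat) => decide (mv.getD v 0 ≤ val.getD v 0)) := by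
    funext v
    simp [PySem.List.pyGetD_natCast, ← decide_not, not_lt]
  rw [hfun]

lemma pvTotalDeficit_eq (n : Nat) (mv val : List Int) :
    pvTotalDeficit (n : Int) mv val
      = ((List.range n).map (fun v => max (mv.getD v 0 - val.getD v 0) 0)).sum := by
  unfold pvTotalDeficit
  rw [pvTotalDeficit_aux (f := fun v => PySem.List.pyGetD mv v 0 - PySem.List.pyGetD val v 0)]
  rw [PySem.List.pyRange_zero_nat, List.map_map]
  simp [Function.comp_def, PySem.List.pyGetD_natCast]

lemma pvAnyBig_total (n : Nat) (mv val : List Int) (rem : Int)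
    (h : pvAnyBigDeficit (n : Int) mv val rem = true) :
    pvTotalDeficit (n : Int) mv val > 2 * rem := by
  unfold pvAnyBigDeficit at h
  rw [PySem.List.pyRange_zero_nat, List.any_map, List.any_eq_true] at h
  obtain ⟨v, hv, hcond⟩ := h
  simp only [Function.comp_def, PySem.List.pyGetD_natCast, Bool.and_eq_true, decide_eq_true_eq] at hcond
  rw [pvTotalDeficit_eq n mv val]
  have hmem : max (mv.getD v 0 - val.getD v 0) 0
      ∈ (List.range n).map (fun v => max (mv.getD v 0 - val.getD v 0) 0) :=
    List.mem_map_of_mem hv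
  have hle := List.single_le_sum (l := (List.range n).map (fun v => max (mv.getD v 0 - val.getD v 0) 0))
    (by intro x hx; simp only [List.mem_map] at hx; obtain ⟨w, -, rfl⟩ := hx; exact le_max_right _ _)
    _ hmem
  omega

lemma pvCWR_mem_length : ∀ (s : List (Int × Int)) (r : Nat) (c : List (Int × Int)),
    c ∈ pvCWR s r → c.length = r := by
  intro s r
  induction s, r using pvCWR.induct with
  | case1 s => intro c hc; rw [pvCWR] at hc; simp at hc; simp [hc]
  | case2 r => intro c hc; rw [pvCWR] at hc; simp at hc
  | case3 x rest r ih1 ih2 =>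
    intro c hc
    rw [pvCWR] at hc
    rw [List.mem_append] at hc
    rcases hc with hc | hc
    · rw [List.mem_map] at hc
      obtain ⟨c', hc', rfl⟩ := hc
      simp [ih1 c' hc']
    · exact ih2 c hc

lemma pvCWR_mem_mem : ∀ (s : List (Int × Int)) (r : Nat) (c : List (Int × Int)),
    c ∈ pvCWR s r → ∀ e ∈ c, e ∈ s := by
  intro s r
  induction s, r using pvCWR.induct with
  | case1 s => intro c hc; rw [pvCWR] at hc; simp at hc; simp [hc]
  | case2 r => intro c hc; rw [pvCWR] at hc; simp at hc
  | case3 x rest r ih1 ih2 =>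
    intro c hc e he
    rw [pvCWR] at hc
    rw [List.mem_append] at hc
    rcases hc with hc | hc
    · rw [List.mem_map] at hc
      obtain ⟨c', hc', rfl⟩ := hc
      rcases List.mem_cons.mp he with rfl | he'
      · exact List.mem_cons_self ..
      · exact ih1 c' hc' e he'
    · exact List.mem_cons_of_mem _ (ih2 c hc e he)

-- pigeonhole: if the total positive deficit exceeds 2*r, no r-edge multiset can reach stability
lemma pvPrune (n : Nat) (mv val : List Int) (hmv : mv.length = n) (hval : val.length = n)
    (c : List (Int × Int)) (hc : ∀ e ∈ c, pvValidE n e)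
    (htot : 2 * (c.length : Int) < ((List.range n).map (fun v => max (mv.getD v 0 - val.getD v 0) 0)).sum) :
    pvStableB mv (pvAcc val c) = false := by
  by_contra hne
  rw [Bool.not_eq_false, pvStableB_iff] at hne
  have hsum : ((List.range n).map (fun v => max (mv.getD v 0 - val.getD v 0) 0)).sum
      ≤ ((List.range n).map (fun v => pvW c v)).sum := by
    apply List.sum_le_sum
    intro v hv
    have hvn : v < n := List.mem_range.mp hv
    have h2 := hne v (by omega)
    rw [pvAcc_getD n c val hval hc v] at h2
    have h3 := pvW_nonneg c v
    omega
  rw [pvW_sum n c hc] at hsum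
  omega

lemma pvFilter_nil (n : Nat) (mv val : List Int) (hmv : mv.length = n) (hval : val.length = n)
    (s : List (Int × Int)) (hs : ∀ e ∈ s, pvValidE n e) (r : Nat)
    (htot : 2 * (r : Int) < pvTotalDeficit (n : Int) mv val) :
    (pvCWR s r).filter (fun c => pvStableB mv (pvAcc val c)) = [] := by
  rw [List.filter_eq_nil_iff]
  intro c hcmem
  have hlen := pvCWR_mem_length s r c hcmem
  have hc : ∀ e ∈ c, pvValidE n e := fun e he => hs e (pvCWR_mem_mem s r c hcmem e he)
  rw [pvTotalDeficit_eq n mv val] at htot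
  have := pvPrune n mv val hmv hval c hc (by rw [hlen]; exact htot)
  simp [this]

lemma pvT_rec (mv : List Int) (x : Int × Int) (s : List (Int × Int)) (r : Nat)
    (val : List Int) (edges : List (Int × Int)) :
    ((pvCWR (x :: s) (r + 1)).filter (fun c => pvStableB mv (pvAcc val c))).map (edges ++ ·)
      = ((pvCWR (x :: s) r).filter (fun c => pvStableB mv (pvAcc (pvBump val x.1 x.2) c))).map ((edges ++ [x]) ++ ·)
        ++ ((pvCWR s (r + 1)).filter (fun c => pvStableB mv (pvAcc val c))).map (edges ++ ·) := by
  rw [show pvCWR (x :: s) (r + 1) = ((pvCWR (x :: s) r).map (x :: ·)) ++ pvCWR s (r + 1) from by rw [pvCWR]]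
  rw [List.filter_append, List.map_append]
  congr 1
  rw [List.filter_map, List.map_map]
  have hp : ((fun c => pvStableB mv (pvAcc val c)) ∘ (x :: ·))
      = (fun c => pvStableB mv (pvAcc (pvBump val x.1 x.2) c)) := by
    funext c
    simp [pvAcc]
  have hm : ((fun c => edges ++ c) ∘ (x :: ·)) = (fun c => (edges ++ [x]) ++ c) := by
    funext c
    simp
  rw [hp, hm]

lemma pvSearch_eq (n : Nat) (mv : List Int) (hmv : mv.length = n)
    (et : List (Int × Int)) (het : ∀ e ∈ et, pvValidE n e) :
    ∀ (r k : Nat), k ≤ et.length → ∀ (num_edges depth : Int), depth = num_edges - (r : Int) →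
    ∀ val : List Int, val.length = n → ∀ edges : List (Int × Int),
    pvSearch num_edges (n : Int) mv et depth (k : Int) val edges
      = ((pvCWR (et.drop k) r).filter (fun c => pvStableB mv (pvAcc val c))).map (edges ++ ·) := by
  intro r
  induction r with
  | zero =>
    intro k hk num_edges depth hdep val hval edges
    have hd : depth = num_edges := by omega
    subst hd
    rw [pvSearch]
    rw [if_pos (beq_self_eq_true depth)]
    rw [pvStableCheckA_eq n mv val hmv]
    cases hs : pvStableB mv val
    · rw [if_neg (by simp [hs])]
      rw [show pvCWR (et.drop k) 0 = [[]] from by rw [pvCWR]]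
      simp [pvAcc, hs]
    · rw [if_pos rfl]
      rw [show pvCWR (et.drop k) 0 = [[]] from by rw [pvCWR]]
      simp [pvAcc, hs]
  | succ r ihr =>
    suffices H : ∀ (j k : Nat), k ≤ et.length → et.length - k = j →
        ∀ (num_edges depth : Int), depth = num_edges - ((r + 1 : Nat) : Int) →
        ∀ val : List Int, val.length = n → ∀ edges : List (Int × Int),
        pvSearch num_edges (n : Int) mv et depth (k : Int) val edges
          = ((pvCWR (et.drop k) (r + 1)).filter (fun c => pvStableB mv (pvAcc val c))).map (edges ++ ·) by
      intro k hk
      exact H (et.length - k) k hk rfl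
    intro j
    induction j with
    | zero =>
      intro k hk hj num_edges depth hdep val hval edges
      have hkeq : k = et.length := by omega
      subst hkeq
      rw [List.drop_length]
      rw [show pvCWR ([] : List (Int × Int)) (r + 1) = [] from by rw [pvCWR]]
      rw [pvSearch]
      rw [if_neg (by simp; omega)]
      cases hany : pvAnyBigDeficit (n : Int) mv val (num_edges - depth)
      · rw [if_neg (by simp [hany])]
        split
        · simp
        · rw [PySem.List.pyRange_one_eq_nil (le_refl _)]
          simp
      · rw [if_pos (by rw [hany])]
        simp
    | succ j ihj =>
      intro k hk hj num_edges depth hdep val hval edges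
      have hklt : k < et.length := by omega
      have hrem : num_edges - depth = ((r + 1 : Nat) : Int) := by omega
      by_cases hprune : 2 * ((r + 1 : Nat) : Int) < pvTotalDeficit (n : Int) mv val
      · -- pruned: both sides are empty
        have hsdrop : ∀ e ∈ et.drop k, pvValidE n e := fun e he => het e (List.mem_of_mem_drop he)
        rw [pvFilter_nil n mv val hmv hval (et.drop k) hsdrop (r + 1) hprune, List.map_nil]
        rw [pvSearch]
        rw [if_neg (by simp; omega)]
        cases hany : pvAnyBigDeficit (n : Int) mv val (num_edges - depth)
        · rw [if_neg (by simp [hany])]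
          rw [dif_pos (by rw [hrem]; omega)]
        · rw [if_pos (by rw [hany])]
      · -- no pruning: peel one loop iteration
        have hany : pvAnyBigDeficit (n : Int) mv val (num_edges - depth) = false := by
          cases hany : pvAnyBigDeficit (n : Int) mv val (num_edges - depth)
          · rfl
          · exfalso
            have := pvAnyBig_total n mv val (num_edges - depth) hany
            rw [hrem] at this
            omega
        have htot : ¬ pvTotalDeficit (n : Int) mv val > 2 * (num_edges - depth) := by
          rw [hrem]; omega
        have hx : PySem.List.pyGetD et (k : Int) (0, 0) = et[k] := by
          rw [PySem.List.pyGetD_natCast]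
          exact List.getD_eq_getElem et (0, 0) hklt
        have hxv : pvValidE n et[k] := het _ (List.getElem_mem hklt)
        -- unfold one step of the loop
        rw [pvSearch]
        rw [if_neg (by simp; omega)]
        rw [if_neg (by simp [hany])]
        rw [dif_neg htot]
        rw [PySem.List.foldl_append_eq_flatMap, List.nil_append]
        rw [PySem.List.pyRange_one_cons (by exact_mod_cast hklt)]
        rw [List.flatMap_cons]
        -- the tail of the loop is exactly the search restarted at k+1
        have htail :
            (PySem.List.pyRange ((k : Int) + 1) ((et.length : Nat) : Int)).flatMap
              (fun idx =>
                pvSearch num_edges (n : Int) mv et (depth + 1) idx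
                  (pvBump val (PySem.List.pyGetD et idx (0, 0)).1 (PySem.List.pyGetD et idx (0, 0)).2)
                  (edges ++ [PySem.List.pyGetD et idx (0, 0)]))
              = pvSearch num_edges (n : Int) mv et depth (((k + 1 : Nat)) : Int) val edges := by
          rw [pvSearch]
          rw [if_neg (by simp; omega)]
          rw [if_neg (by simp [hany])]
          rw [dif_neg htot]
          rw [PySem.List.foldl_append_eq_flatMap, List.nil_append]
          congr 1
        rw [htail]
        -- head call: apply the outer induction hypothesis at r
        rw [hx]
        have hbl : (pvBump val et[k].1 et[k].2).length = n := by rw [pvBump_length]; exact hval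
        rw [ihr k (by omega) num_edges (depth + 1) (by push_cast; push_cast at hdep; omega)
          (pvBump val et[k].1 et[k].2) hbl (edges ++ [et[k]])]
        -- tail: apply the inner induction hypothesis at k+1
        rw [ihj (k + 1) (by omega) (by omega) num_edges depth hdep val hval edges]
        -- combine with the filter/map recurrence
        rw [List.drop_eq_getElem_cons hklt]
        exact (pvT_rec mv et[k] (et.drop (k + 1)) r val edges).symm

-- ===== VERDICT (by name: the statement is the Claim_ definition above) =====
lemma pvEdgeTypes_valid (n : Nat) : ∀ e ∈ pvEdgeTypes (n : Int), pvValidE n e := by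
  intro e he
  unfold pvEdgeTypes at he
  simp only [List.mem_flatMap, List.mem_map] at he
  obtain ⟨i, hi, j, hj, rfl⟩ := he
  rw [PySem.List.mem_pyRange_one] at hi hj
  exact ⟨hi.1, hi.2, le_trans hi.1 hj.1, hj.2⟩

theorem enumerate_edges_with_pruning_py_spec : Claim_equal_enumerate_edges_with_pruning_py := by
  intro genera num_edges _hdom _hpre
  unfold Spec_enumerate_edges_with_pruning_py
  unfold enumerate_edges_with_pruning_py enumerate_edges_with_pruning_py_alt
  simp only []
  by_cases hneg : num_edges < 0
  · rw [if_pos hneg]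
    rw [pvSearch]
    simp only [Int.sub_zero]
    rw [if_neg (by simp; omega)]
    cases hany : pvAnyBigDeficit ((genera.length : Nat) : Int) (genera.map pvMinValence)
        (List.replicate genera.length 0) num_edges
    · rw [if_neg (by simp [hany])]
      rw [dif_pos (by
        have := pvTotalDeficit_nonneg ((genera.length : Nat) : Int) (genera.map pvMinValence)
          (List.replicate genera.length 0)
        omega)]
    · rw [if_pos (by simp [hany])]
  · rw [if_neg hneg]
    have h0 : (0 : Int) = num_edges - ((num_edges.toNat : Nat) : Int) := by omega
    have := pvSearch_eq genera.length (genera.map pvMinValence) (by simp)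
      (pvEdgeTypes ((genera.length : Nat) : Int)) (pvEdgeTypes_valid genera.length)
      num_edges.toNat 0 (by omega) num_edges 0 h0
      (List.replicate genera.length 0) (by simp) []
    simp only [Nat.cast_zero, List.drop_zero] at this
    rw [this]
    simp
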